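-- pv_equiv track=rewrite | github.com/fortotal/test_tasks | task_1/task_1.py | cars_order
-- ===== SOURCE A (Python) =====
-- def cars_order(red_cars: int = 3, white_cars: int = 3) -> str:
--     assert red_cars >= 1 and white_cars >= 2, 'Минимальное кол-во красных машин - 1, белых - 2, по условию задачи'
--
--     if red_cars >= white_cars:
--         return 'Нет решения!'
--
--     answer = 'WRW'
--     red_cars -= 1
--     white_cars -= 2
--
--     if red_cars == 0 and white_cars > 0:
--         return 'Нет решения!'
--
--     while (red_cars > 0) and (white_cars > 0):
--         if red_cars == white_cars:
--             answer += 'RW' * red_cars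
--             return answer
--         else:
--             answer += 'WRW'
--             red_cars -= 1
--             white_cars -= 2
--
--         if red_cars == 0 and white_cars > 0:
--             return 'Нет решения!'
--
--     return answer
-- ===== SOURCE B (Python) =====
-- def cars_order(red_cars: int = 3, white_cars: int = 3) -> str:
--     assert red_cars >= 1 and white_cars >= 2, 'Минимальное кол-во красных машин - 1, белых - 2, по условию задачи'
--     if red_cars >= white_cars or white_cars > 2 * red_cars:
--         return 'Нет решения!'
--     return 'WRW' * (white_cars - red_cars) + 'RW' * (2 * red_cars - white_cars)
-- ===== Notes on version B (the rewrite author's own statement) =====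
-- stated objective: simpler
-- what changed: Replaced A's decrementing while-loop that appends 'WRW' blocks one at a time with a closed-form solvability test (solution iff red < white <= 2*red) and direct string arithmetic 'WRW'*(W-R) + 'RW'*(2R-W).
import Mathlib
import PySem

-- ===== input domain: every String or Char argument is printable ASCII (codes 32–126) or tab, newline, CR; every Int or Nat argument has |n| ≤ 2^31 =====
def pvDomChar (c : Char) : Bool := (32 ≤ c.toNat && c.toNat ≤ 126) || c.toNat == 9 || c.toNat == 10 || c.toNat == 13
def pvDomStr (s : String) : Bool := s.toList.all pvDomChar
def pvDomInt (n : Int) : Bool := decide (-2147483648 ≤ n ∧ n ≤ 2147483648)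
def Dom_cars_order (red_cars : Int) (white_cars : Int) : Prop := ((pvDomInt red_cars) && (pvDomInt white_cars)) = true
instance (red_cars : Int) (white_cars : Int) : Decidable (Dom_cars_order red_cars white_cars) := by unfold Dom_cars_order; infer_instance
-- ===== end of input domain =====

-- B replaces A's decrementing while-loop with a closed-form test and direct block arithmetic (same values; objective: simpler).
-- ===== PORT A =====
-- shared literal helper: Python's 's * n' (string repetition, n ≥ 0)
def repStr (s : String) : Nat → String
  | 0 => ""
  | n + 1 => s ++ repStr s n

-- the while-loop of A, step for step (terminates since red_cars decreases)
def carsLoop (red_cars white_cars : Int) (answer : String) : String :=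
  if red_cars > 0 ∧ white_cars > 0 then
    if red_cars = white_cars then
      answer ++ repStr "RW" red_cars.toNat
    else
      let answer' := answer ++ "WRW"
      let r := red_cars - 1
      let w := white_cars - 2
      if r = 0 ∧ w > 0 then "Нет решения!"
      else carsLoop r w answer'
  else answer
termination_by red_cars.toNat
decreasing_by omega

def cars_order (red_cars : Int) (white_cars : Int) : String :=
  if red_cars ≥ white_cars then "Нет решения!"
  else
    let answer := "WRW"
    let r := red_cars - 1
    let w := white_cars - 2
    if r = 0 ∧ w > 0 then "Нет решения!"
    else carsLoop r w answer

-- ===== PORT B =====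
def cars_order_alt (red_cars : Int) (white_cars : Int) : String :=
  if red_cars ≥ white_cars ∨ white_cars > 2 * red_cars then "Нет решения!"
  else repStr "WRW" (white_cars - red_cars).toNat ++ repStr "RW" (2 * red_cars - white_cars).toNat

-- ===== PRECONDITION & SPEC =====
-- Pre_ excludes exactly the inputs where A's assert raises AssertionError (red_cars < 1 or white_cars < 2).
def Pre_cars_order (red_cars : Int) (white_cars : Int) : Prop := red_cars ≥ 1 ∧ white_cars ≥ 2
instance (red_cars : Int) (white_cars : Int) : Decidable (Pre_cars_order red_cars white_cars) := by unfold Pre_cars_order; infer_instance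
def pvWitness_cars_order : Int × Int := (2, 3)
def Spec_cars_order (red_cars : Int) (white_cars : Int) (out : String) : Prop := out = cars_order_alt red_cars white_cars
instance (red_cars : Int) (white_cars : Int) (out : String) : Decidable (Spec_cars_order red_cars white_cars out) := by unfold Spec_cars_order; infer_instance

-- ===== CLAIM (what is proved, stated in full; the proofs are below) =====
def Claim_equal_cars_order : Prop := ∀ (red_cars : Int) (white_cars : Int), Dom_cars_order red_cars white_cars → Pre_cars_order red_cars white_cars → Spec_cars_order red_cars white_cars (cars_order red_cars white_cars)

-- ===== LEMMAS AND PROOFS =====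

theorem carsLoop_char (n : Nat) (red white : Int) (ans : String)
    (hn : red.toNat ≤ n) (h0 : 0 ≤ red) (hle : red ≤ white) (hnp : ¬(red = 0 ∧ white > 0)) :
    carsLoop red white ans =
      if white ≤ 2 * red then
        ans ++ repStr "WRW" (white - red).toNat ++ repStr "RW" (2 * red - white).toNat
      else "Нет решения!" := by
  induction n generalizing red white ans with
  | zero =>
    have hr : red = 0 := by omega
    have hw : white = 0 := by omega
    subst hr; subst hw
    rw [carsLoop]
    simp [repStr]
  | succ n ih =>
    rw [carsLoop]
    by_cases hpos : red > 0 ∧ white > 0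
    · simp only [hpos]
      by_cases heq : red = white
      · subst heq
        have h1 : ¬ red < red := lt_irrefl red
        have h2 : red ≤ 2 * red := by omega
        have h3 : (red - red).toNat = 0 := by omega
        have h4 : (2 * red - red).toNat = red.toNat := by omega
        simp [h2, h4, repStr]
      · simp only [heq, if_false]
        have hlt : red < white := lt_of_le_of_ne hle heq
        by_cases hstop : red - 1 = 0 ∧ white - 2 > 0
        · simp only [hstop, if_true]
          have : ¬ white ≤ 2 * red := by omega
          simp [this]
        · simp only [hstop, if_false]
          rw [ih (red - 1) (white - 2) (ans ++ "WRW") (by omega) (by omega) (by omega) hstop]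
          by_cases hc : white ≤ 2 * red
          · rw [if_pos (show white - 2 ≤ 2 * (red - 1) by omega), if_pos hc]
            have hsucc : (white - red).toNat = (white - 2 - (red - 1)).toNat + 1 := by omega
            have htl : (2 * (red - 1) - (white - 2)).toNat = (2 * red - white).toNat := by omega
            rw [hsucc, htl]
            simp [repStr, String.append_assoc]
          · rw [if_neg (show ¬ white - 2 ≤ 2 * (red - 1) by omega), if_neg hc]
            simp
    · simp only [hpos, if_false]
      have hr : red = 0 := by omega
      have hw : white = 0 := by omega
      subst hr; subst hw
      simp [repStr]

-- ===== VERDICT (by name: the statement is the Claim_ definition above) =====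
theorem cars_order_spec : Claim_equal_cars_order := by
  intro R W _ hpre
  unfold Spec_cars_order cars_order cars_order_alt
  obtain ⟨hR, hW⟩ := hpre
  by_cases hge : R ≥ W
  · simp [hge]
  · have hlt : R < W := by omega
    simp only [hge, if_false]
    by_cases hstop : R - 1 = 0 ∧ W - 2 > 0
    · simp [hstop, show (2 : Int) < W by omega, show 2 * R < W by omega]
    · simp only [hstop, if_false]
      rw [carsLoop_char (R - 1).toNat (R - 1) (W - 2) "WRW" (le_refl _) (by omega) (by omega) hstop]
      by_cases hsol : W ≤ 2 * R
      · have h1 : W - 2 ≤ 2 * (R - 1) := by omega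
        have h2 : ¬ (R ≥ W ∨ W > 2 * R) := by omega
        rw [if_pos h1]
        simp only [show ¬ W > 2 * R by omega, false_or, if_false]
        have hsucc : (W - R).toNat = (W - 2 - (R - 1)).toNat + 1 := by omega
        have htl : (2 * (R - 1) - (W - 2)).toNat = (2 * R - W).toNat := by omega
        rw [hsucc, htl]
        simp [repStr, String.append_assoc]
      · have h1 : ¬ (W - 2 ≤ 2 * (R - 1)) := by omega
        have h2 : R ≥ W ∨ W > 2 * R := by omega
        rw [if_neg h1]
        simp [show W > 2 * R by omega]
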